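-- pv_equiv track=rewrite | github.com/PavlovMN/keys4 | dragon_power.py | improve_breakdown
-- ===== SOURCE A (Python) =====
-- def improve_breakdown(breakdown):
--     """
--     Улучшает разбиение, заменяя пары 2+2 на 4, пары 3+1 на 2+2 и т.д.
--     """
--     improved = breakdown.copy()
--
--     # Заменяем 2+2 на 4 (2*2 = 4, но 4 лучше для дальнейших операций)
--     while improved.count(2) >= 2:
--         improved.remove(2)
--         improved.remove(2)
--         improved.append(4)
--
--     # Заменяем 3+1 на 2+2 (3*1=3 < 2*2=4)
--     while 3 in improved and 1 in improved:
--         improved.remove(3)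
--         improved.remove(1)
--         improved.append(2)
--         improved.append(2)
--
--     # Сортируем для лучшего представления
--     improved.sort(reverse=True)
--
--     return improved
-- ===== SOURCE B (Python) =====
-- def improve_breakdown(breakdown):
--     c1 = breakdown.count(1)
--     c2 = breakdown.count(2)
--     c3 = breakdown.count(3)
--     m = min(c1, c3)
--     rest = [x for x in breakdown if x not in (1, 2, 3)]
--     rest += [4] * (c2 // 2)
--     rest += [3] * (c3 - m)
--     rest += [2] * (c2 % 2 + 2 * m)
--     rest += [1] * (c1 - m)
--     return sorted(rest, reverse=True)
-- ===== Notes on version B (the rewrite author's own statement) =====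
-- stated objective: alternative
-- what changed: A's repeated remove/append while-loops (each remove rescans the list) are replaced by counting the 1s, 2s and 3s once, computing the resulting multiplicities in closed form, building the result list in one pass and sorting it once.
import Mathlib
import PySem

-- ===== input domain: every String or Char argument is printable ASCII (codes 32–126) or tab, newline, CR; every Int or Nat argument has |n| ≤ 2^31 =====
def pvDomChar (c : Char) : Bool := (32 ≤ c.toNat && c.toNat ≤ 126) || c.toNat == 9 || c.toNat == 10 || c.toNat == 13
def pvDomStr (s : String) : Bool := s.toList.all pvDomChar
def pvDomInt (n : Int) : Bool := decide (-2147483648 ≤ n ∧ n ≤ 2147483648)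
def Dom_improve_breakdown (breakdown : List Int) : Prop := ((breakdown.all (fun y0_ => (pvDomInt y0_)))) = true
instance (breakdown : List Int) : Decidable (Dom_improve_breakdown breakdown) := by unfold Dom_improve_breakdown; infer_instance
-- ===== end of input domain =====

-- B replaces A's repeated remove/append while-loops by three counts and one closed-form
-- rebuild followed by a single sort; equivalence is proved for all inputs.

-- ===== PORT A =====
-- while improved.count(2) >= 2: improved.remove(2); improved.remove(2); improved.append(4)
-- (the guard guarantees 2 ∈ l, so remove(2) = List.erase, by PySem.List.remove?_eq_some_erase)
def pvLoop1 (l : List Int) : List Int :=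
  if 2 ≤ PySem.List.count l 2 then
    pvLoop1 (((l.erase 2).erase 2) ++ [4])
  else l
termination_by l.count 2
decreasing_by
  simp only [PySem.List.count_eq] at *
  simp [List.count_append, List.count_erase_self]
  omega

-- while 3 in improved and 1 in improved: remove(3); remove(1); append(2); append(2)
def pvLoop2 (l : List Int) : List Int :=
  if 3 ∈ l ∧ 1 ∈ l then
    pvLoop2 (((l.erase 3).erase 1) ++ [2, 2])
  else l
termination_by l.count 3
decreasing_by
  rename_i h
  have h3 : 0 < l.count 3 := List.count_pos_iff.mpr h.1
  have e3 : ((l.erase 3).erase 1 ++ [2, 2]).count 3 = l.count 3 - 1 := by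
    simp [List.count_append, List.count_erase_of_ne (show (3 : Int) ≠ 1 by norm_num),
      List.count_erase_self]
  omega

def improve_breakdown (breakdown : List Int) : List Int :=
  let improved := breakdown            -- breakdown.copy()
  let improved := pvLoop1 improved     -- first while loop
  let improved := pvLoop2 improved     -- second while loop
  PySem.List.sorted improved (fun x => x) true   -- improved.sort(reverse=True)

-- ===== PORT B =====
def improve_breakdown_alt (breakdown : List Int) : List Int :=
  let c1 := PySem.List.count breakdown 1
  let c2 := PySem.List.count breakdown 2
  let c3 := PySem.List.count breakdown 3
  let m := min c1 c3
  -- [x for x in breakdown if x not in (1, 2, 3)]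
  let rest := breakdown.filter (fun x => !(x == 1 || x == 2 || x == 3))
  -- the counts are Nat (Python's nonnegative ints here), so / and % are Python's // and %
  let rest := rest ++ List.replicate (c2 / 2) 4
  let rest := rest ++ List.replicate (c3 - m) 3
  let rest := rest ++ List.replicate (c2 % 2 + 2 * m) 2
  let rest := rest ++ List.replicate (c1 - m) 1
  PySem.List.sorted rest (fun x => x) true

-- ===== PRECONDITION & SPEC =====
def Spec_improve_breakdown (breakdown : List Int) (out : List Int) : Prop := out = improve_breakdown_alt breakdown
instance (breakdown : List Int) (out : List Int) : Decidable (Spec_improve_breakdown breakdown out) := by unfold Spec_improve_breakdown; infer_instance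

-- ===== CLAIM (what is proved, stated in full; the proofs are below) =====
def Claim_equal_improve_breakdown : Prop := ∀ (breakdown : List Int), Dom_improve_breakdown breakdown → Spec_improve_breakdown breakdown (improve_breakdown breakdown)

-- ===== LEMMAS AND PROOFS =====

-- descending sort (identity key) depends only on the multiset
lemma sorted_rev_eq_of_perm (xs ys : List Int) (h : xs.Perm ys) :
    PySem.List.sorted xs (fun x => x) true = PySem.List.sorted ys (fun x => x) true := by
  refine List.Perm.eq_of_pairwise (le := fun a b : Int => b ≤ a)
    (fun a b _ _ hab hba => le_antisymm hba hab)
    (PySem.List.sorted_pairwise_rev xs _) (PySem.List.sorted_pairwise_rev ys _) ?_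
  exact ((PySem.List.sorted_perm xs _ true).trans h).trans
    (PySem.List.sorted_perm ys _ true).symm

lemma count_pvLoop1 (l : List Int) (v : Int) :
    (pvLoop1 l).count v =
      if v = 2 then l.count 2 % 2
      else if v = 4 then l.count 4 + l.count 2 / 2
      else l.count v := by
  fun_induction pvLoop1 l with
  | case1 l h ih =>
    simp only [PySem.List.count_eq] at h
    have e2 : ((l.erase 2).erase 2 ++ [4]).count 2 = l.count 2 - 2 := by
      simp [List.count_append, List.count_erase_self]; omega
    have e4 : ((l.erase 2).erase 2 ++ [4]).count 4 = l.count 4 + 1 := by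
      simp [List.count_append, List.count_erase_of_ne (show (4 : Int) ≠ 2 by norm_num)]
    by_cases hv2 : v = 2
    · subst hv2; rw [ih]; simp [e2]; omega
    · by_cases hv4 : v = 4
      · subst hv4; rw [ih]; simp [e2, e4]; omega
      · have eo : ((l.erase 2).erase 2 ++ [4]).count v = l.count v := by
          simp [List.count_append, List.count_erase_of_ne hv2,
            Ne.symm hv4]
        rw [ih]; simp [hv2, hv4, eo]
  | case2 l h =>
    simp only [PySem.List.count_eq] at h
    by_cases hv2 : v = 2
    · subst hv2; simp; omega
    · by_cases hv4 : v = 4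
      · subst hv4; simp; omega
      · simp [hv2, hv4]

lemma count_pvLoop2 (l : List Int) (v : Int) :
    (pvLoop2 l).count v =
      if v = 3 then l.count 3 - min (l.count 1) (l.count 3)
      else if v = 1 then l.count 1 - min (l.count 1) (l.count 3)
      else if v = 2 then l.count 2 + 2 * min (l.count 1) (l.count 3)
      else l.count v := by
  fun_induction pvLoop2 l with
  | case1 l h ih =>
    have h3 : 0 < l.count 3 := List.count_pos_iff.mpr h.1
    have h1 : 0 < l.count 1 := List.count_pos_iff.mpr h.2
    have e3 : ((l.erase 3).erase 1 ++ [2, 2]).count 3 = l.count 3 - 1 := by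
      simp [List.count_append, List.count_erase_of_ne (show (3 : Int) ≠ 1 by norm_num),
        List.count_erase_self]
    have e1 : ((l.erase 3).erase 1 ++ [2, 2]).count 1 = l.count 1 - 1 := by
      simp [List.count_append, List.count_erase_of_ne (show (1 : Int) ≠ 3 by norm_num),
        List.count_erase_self]
    have e2 : ((l.erase 3).erase 1 ++ [2, 2]).count 2 = l.count 2 + 2 := by
      simp [List.count_append, List.count_erase_of_ne (show (2 : Int) ≠ 3 by norm_num),
        List.count_erase_of_ne (show (2 : Int) ≠ 1 by norm_num)]
    by_cases hv3 : v = 3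
    · subst hv3; rw [ih]; simp [e3, e1]; omega
    · by_cases hv1 : v = 1
      · subst hv1; rw [ih]; simp [e3, e1]; omega
      · by_cases hv2 : v = 2
        · subst hv2; rw [ih]; simp [e3, e1, e2]; omega
        · have eo : ((l.erase 3).erase 1 ++ [2, 2]).count v = l.count v := by
            simp [List.count_append, List.count_erase_of_ne hv3,
              List.count_erase_of_ne hv1, Ne.symm hv2]
          rw [ih]; simp [hv3, hv1, hv2, eo]
  | case2 l h =>
    have hmin : min (l.count 1) (l.count 3) = 0 := by
      rcases not_and_or.mp h with h' | h'
      · have := List.count_eq_zero.mpr h'; omega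
      · have := List.count_eq_zero.mpr h'; omega
    rw [hmin]
    by_cases hv3 : v = 3
    · subst hv3; simp
    · by_cases hv1 : v = 1
      · subst hv1; simp
      · by_cases hv2 : v = 2
        · subst hv2; simp
        · simp [hv3, hv1, hv2]

lemma count_filter_rest (l : List Int) (v : Int) :
    (l.filter (fun x => !(x == 1 || x == 2 || x == 3))).count v =
      if v = 1 ∨ v = 2 ∨ v = 3 then 0 else l.count v := by
  split
  · rename_i hv
    refine List.count_eq_zero.mpr (fun hm => ?_)
    rcases List.mem_filter.mp hm with ⟨_, hp⟩
    simp at hp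
    rcases hv with h | h | h <;> simp [h] at hp
  · rename_i hv
    simp only [not_or] at hv
    exact List.count_filter (by simp [hv.1, hv.2.1, hv.2.2])

-- ===== VERDICT (by name: the statement is the Claim_ definition above) =====
theorem improve_breakdown_spec : Claim_equal_improve_breakdown := by
  unfold Claim_equal_improve_breakdown Spec_improve_breakdown
  intro l _
  unfold improve_breakdown improve_breakdown_alt
  simp only [PySem.List.count_eq]
  apply sorted_rev_eq_of_perm
  rw [List.perm_iff_count]
  intro v
  have h1 := count_pvLoop1 l 1
  have h2 := count_pvLoop1 l 2
  have h3 := count_pvLoop1 l 3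
  simp at h1 h2 h3
  have hv := count_pvLoop1 l v
  rw [count_pvLoop2, h1, h2, h3, hv]
  simp only [List.count_append, List.count_replicate, count_filter_rest]
  by_cases hv1 : v = 1
  · subst hv1; simp
  · by_cases hv2 : v = 2
    · subst hv2; simp
    · by_cases hv3 : v = 3
      · subst hv3; simp
      · by_cases hv4 : v = 4
        · subst hv4; simp
        · simp [hv1, hv2, hv3, hv4, Ne.symm hv1, Ne.symm hv2, Ne.symm hv3, Ne.symm hv4]
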